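-- pv_equiv track=rewrite | github.com/ahaspel/britannica-edition | tools/pipeline/build_printed_pages.py | _build_ocr_runs
-- ===== SOURCE A (Python) =====
-- def _build_ocr_runs(pairs: list[tuple[int, int]]) -> list[list[tuple[int, int]]]:
--     """Group consecutive OCR pairs with matching offset into runs.
--
--     Includes singletons: an isolated correct OCR reading in a
--     plate-heavy region is often the only clue that a given leaf is
--     numbered. The monotonic-offset accept-filter downstream still
--     rejects singletons whose offset contradicts the volume's running
--     offset, so OCR noise doesn't leak through."""
--     runs = []
--     if not pairs:
--         return runs
--     cur = [pairs[0]]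
--     for i in range(1, len(pairs)):
--         leaf, printed = pairs[i]
--         pl, pp = pairs[i - 1]
--         if printed == pp + (leaf - pl):
--             cur.append(pairs[i])
--         else:
--             runs.append(cur)
--             cur = [pairs[i]]
--     runs.append(cur)
--     return runs
-- ===== SOURCE B (Python) =====
-- def _build_ocr_runs(pairs: list[tuple[int, int]]) -> list[list[tuple[int, int]]]:
--     """Group consecutive pairs sharing the offset key printed - leaf into runs."""
--     runs = []
--     i, n = 0, len(pairs)
--     while i < n:
--         k = pairs[i][1] - pairs[i][0]
--         j = i + 1
--         while j < n and pairs[j][1] - pairs[j][0] == k: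
--             j += 1
--         runs.append(pairs[i:j])
--         i = j
--     return runs
-- ===== Notes on version B (the rewrite author's own statement) =====
-- stated objective: simpler
-- what changed: Replaces the previous-pair/current-run accumulator state machine with key-based grouping: reduce the run condition to equality of the per-pair offset key printed - leaf, then repeatedly take the maximal span of pairs sharing the head's key and emit it as a slice, with no prev/cur state.
import Mathlib
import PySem

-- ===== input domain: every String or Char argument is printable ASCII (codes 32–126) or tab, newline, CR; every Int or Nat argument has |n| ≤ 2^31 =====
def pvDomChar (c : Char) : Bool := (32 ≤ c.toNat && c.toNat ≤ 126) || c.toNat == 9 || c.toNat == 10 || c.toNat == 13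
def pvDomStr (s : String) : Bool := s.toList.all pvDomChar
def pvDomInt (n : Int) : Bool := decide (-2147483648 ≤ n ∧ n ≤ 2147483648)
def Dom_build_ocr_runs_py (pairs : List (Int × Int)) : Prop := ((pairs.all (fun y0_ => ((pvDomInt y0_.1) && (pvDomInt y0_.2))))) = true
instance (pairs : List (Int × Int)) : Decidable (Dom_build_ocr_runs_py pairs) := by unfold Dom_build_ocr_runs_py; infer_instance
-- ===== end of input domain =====

-- B groups pairs by the offset key printed - leaf, emitting maximal equal-key spans
-- instead of A's previous-pair/current-run accumulator loop ("simpler" objective).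


-- ===== PORT A =====
-- A's for-loop: state is (previous pair, current run, runs so far); final `runs.append(cur)`.
def buildA_loop (prev : Int × Int) (cur : List (Int × Int)) (rest : List (Int × Int))
    (runs : List (List (Int × Int))) : List (List (Int × Int)) :=
  match rest with
  | [] => runs ++ [cur]
  | p :: rest' =>
    if p.2 = prev.2 + (p.1 - prev.1) then buildA_loop p (cur ++ [p]) rest' runs
    else buildA_loop p [p] rest' (runs ++ [cur])

def build_ocr_runs_py (pairs : List (Int × Int)) : List (List (Int × Int)) :=
  match pairs with
  | [] => []
  | p :: rest => buildA_loop p [p] rest []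

-- ===== PORT B =====
-- B's inner while loop: maximal span of pairs whose key p.2 - p.1 equals k, plus the rest.
def spanKey (k : Int) (xs : List (Int × Int)) : List (Int × Int) × List (Int × Int) :=
  match xs with
  | [] => ([], [])
  | p :: xs' =>
    if p.2 - p.1 = k then
      let (g, r) := spanKey k xs'
      (p :: g, r)
    else ([], p :: xs')

theorem spanKey_snd_length (k : Int) (xs : List (Int × Int)) :
    (spanKey k xs).2.length ≤ xs.length := by
  induction xs with
  | nil => simp [spanKey]
  | cons p xs' ih =>
    simp only [spanKey]
    split
    · simpa using Nat.le_succ_of_le ih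
    · simp

-- B's outer while loop: emit the head's maximal span, continue on the remainder.
def build_ocr_runs_py_alt (pairs : List (Int × Int)) : List (List (Int × Int)) :=
  match pairs with
  | [] => []
  | p :: rest =>
    let s := spanKey (p.2 - p.1) rest
    (p :: s.1) :: build_ocr_runs_py_alt s.2
termination_by pairs.length
decreasing_by
  exact Nat.lt_succ_of_le (spanKey_snd_length _ _)

-- ===== PRECONDITION & SPEC =====
def Spec_build_ocr_runs_py (pairs : List (Int × Int)) (out : List (List (Int × Int))) : Prop := out = build_ocr_runs_py_alt pairs
instance (pairs : List (Int × Int)) (out : List (List (Int × Int))) : Decidable (Spec_build_ocr_runs_py pairs out) := by unfold Spec_build_ocr_runs_py; infer_instance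

-- ===== CLAIM (what is proved, stated in full; the proofs are below) =====
def Claim_equal_build_ocr_runs_py : Prop := ∀ (pairs : List (Int × Int)), Dom_build_ocr_runs_py pairs → Spec_build_ocr_runs_py pairs (build_ocr_runs_py pairs)

-- ===== LEMMAS AND PROOFS =====

-- Invariant of A's loop: it flushes `runs`, extends `cur` by the maximal span of
-- pairs matching prev's offset key, and grouping restarts on the remainder.
theorem buildA_loop_eq (rest : List (Int × Int)) :
    ∀ (prev : Int × Int) (cur : List (Int × Int)) (runs : List (List (Int × Int))),
      buildA_loop prev cur rest runs =
        runs ++ ((cur ++ (spanKey (prev.2 - prev.1) rest).1)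
                  :: build_ocr_runs_py_alt (spanKey (prev.2 - prev.1) rest).2) := by
  induction rest with
  | nil =>
    intro prev cur runs
    simp [buildA_loop, spanKey, build_ocr_runs_py_alt]
  | cons p rest' ih =>
    intro prev cur runs
    simp only [buildA_loop, spanKey]
    by_cases h : p.2 - p.1 = prev.2 - prev.1
    · have hcond : p.2 = prev.2 + (p.1 - prev.1) := by omega
      rw [if_pos hcond, if_pos h, ih p (cur ++ [p]) runs]
      have hk : p.2 - p.1 = prev.2 - prev.1 := h
      simp [hk, List.append_assoc]
    · have hcond : ¬ p.2 = prev.2 + (p.1 - prev.1) := by omega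
      rw [if_neg hcond, if_neg h, ih p [p] (runs ++ [cur])]
      rw [build_ocr_runs_py_alt]
      simp [List.append_assoc]

-- ===== VERDICT (by name: the statement is the Claim_ definition above) =====
theorem build_ocr_runs_py_spec : Claim_equal_build_ocr_runs_py := by
  intro pairs _
  unfold Spec_build_ocr_runs_py
  cases pairs with
  | nil => simp [build_ocr_runs_py, build_ocr_runs_py_alt]
  | cons p rest =>
    rw [build_ocr_runs_py_alt]
    simp [build_ocr_runs_py, buildA_loop_eq]
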